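-- pv_equiv track=rewrite | github.com/epeisach/py-toolpy | toolpy/tls_correct.py | chain_res_list
-- ===== SOURCE A (Python) =====
-- def chain_res_list(fr, id):
--     """use dic to contain chain-ID and residue range, pdb is a list.
--     id=0: not include waters; id=1: include waters.
--     """
--
--     chain, chain_range = {}, {}
--     ch_old, n_old = "?", -99999
--
--     for ln in fr:
--         if "ATOM" in ln[:4] or "HETATM" in ln[:6]:
--             if id == 0 and "HOH" in ln[16:20]:
--                 continue
--             ch = ln[20:22].strip()
--             if ch not in chain.keys() and ch != " ":
--                 chain[ch] = []
--             nres = ln[22:26]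
--             n = int(nres)
--             if ch in chain.keys():
--                 if n == n_old and ch == ch_old:
--                     continue
--                 chain[ch].append(n)
--             n_old = n
--             ch_old = ch
--
--     for x in chain.keys():
--         if len(chain[x]) > 0:
--             chain_range[x] = [min(chain[x]), max(chain[x])]
--
--     return chain, chain_range
-- ===== SOURCE B (Python) =====
-- def chain_res_list(fr, id):
--     """Single pass: build chain lists and their [min,max] ranges together.
--     id=0: not include waters; id=1: include waters.
--     """
--     chain, chain_range = {}, {}
--     prev = None
--     for ln in fr:
--         if ln[:4] != "ATOM" and ln[:6] != "HETATM":
--             continue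
--         if id == 0 and "HOH" in ln[16:20]:
--             continue
--         ch = ln[20:22].strip()
--         n = int(ln[22:26])
--         if (n, ch) == prev:
--             continue
--         if ch in chain:
--             chain[ch].append(n)
--             lo, hi = chain_range[ch]
--             chain_range[ch] = [min(lo, n), max(hi, n)]
--         else:
--             chain[ch] = [n]
--             chain_range[ch] = [n, n]
--         prev = (n, ch)
--     return chain, chain_range
-- ===== Notes on version B (the rewrite author's own statement) =====
-- stated objective: alternative
-- what changed: B merges A's two phases into a single pass that maintains each chain's [min,max] range incrementally as residues are appended, instead of A's scheme of first collecting all residue lists and then running a second loop taking min/max over each full list.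
import Mathlib
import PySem

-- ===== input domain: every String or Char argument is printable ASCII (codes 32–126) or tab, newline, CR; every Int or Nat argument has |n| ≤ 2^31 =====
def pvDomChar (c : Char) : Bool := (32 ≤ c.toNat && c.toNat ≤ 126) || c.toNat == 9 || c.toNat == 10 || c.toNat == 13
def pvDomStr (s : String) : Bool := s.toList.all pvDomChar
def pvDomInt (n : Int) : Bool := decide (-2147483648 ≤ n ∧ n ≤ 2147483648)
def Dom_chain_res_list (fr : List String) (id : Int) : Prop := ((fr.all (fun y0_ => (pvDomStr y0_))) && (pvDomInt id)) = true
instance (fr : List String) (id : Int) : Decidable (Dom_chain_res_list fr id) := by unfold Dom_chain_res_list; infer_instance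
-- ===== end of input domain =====

-- B replaces A's two-phase scheme (collect all residues, then a second loop taking min/max of
-- each full list) by a single pass that maintains each chain's [min,max] range incrementally;
-- objective: alternative (one loop, running extrema, no second traversal).

-- ===== PORT A =====
-- state: (chain, ch_old, n_old); none = ValueError from int(nres)
def pvStepA (id : Int) (st : Option (PySem.Dict String (List Int) × String × Int)) (ln : String) :
    Option (PySem.Dict String (List Int) × String × Int) :=
  match st with
  | none => none
  | some (chain, ch_old, n_old) =>
    let cs := ln.toList
    if PySem.Chars.isIn "ATOM".toList (PySem.List.slice cs none (some 4)) ||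
       PySem.Chars.isIn "HETATM".toList (PySem.List.slice cs none (some 6)) then
      if id == 0 && PySem.Chars.isIn "HOH".toList (PySem.List.slice cs (some 16) (some 20)) then
        some (chain, ch_old, n_old)
      else
        let ch := String.ofList (PySem.Chars.strip (PySem.List.slice cs (some 20) (some 22)))
        let chain1 := if !chain.contains ch && !(ch == " ") then chain.insert ch [] else chain
        match PySem.Int.ofChars? (PySem.List.slice cs (some 22) (some 26)) with
        | none => none
        | some n =>
          if chain1.contains ch then
            if n == n_old && ch == ch_old then some (chain1, ch_old, n_old)
            else some (chain1.modify ch [] (· ++ [n]), ch, n)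
          else some (chain1, ch, n)
    else some (chain, ch_old, n_old)

-- A's second loop body: chain_range[x] = [min(chain[x]), max(chain[x])] when len > 0
def pvRangeStep (chain : PySem.Dict String (List Int))
    (r : PySem.Dict String (List Int)) (x : String) : PySem.Dict String (List Int) :=
  if (chain.getD x []).length > 0 then
    match PySem.List.min? (chain.getD x []) (fun y => y),
          PySem.List.max? (chain.getD x []) (fun y => y) with
    | some mn, some mx => r.insert x [mn, mx]
    | _, _ => r
  else r

def chain_res_list (fr : List String) (id : Int) :
    (List (String × List Int)) × (List (String × List Int)) :=
  match fr.foldl (pvStepA id) (some (PySem.Dict.empty, "?", (-99999 : Int))) with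
  | none => ([], [])
  | some (chain, _, _) =>
    (chain.items, (chain.keys.foldl (pvRangeStep chain) PySem.Dict.empty).items)

-- ===== PORT B =====
-- state: (chain, chain_range, prev); none = ValueError from int(ln[22:26])
def pvStepB (id : Int)
    (st : Option (PySem.Dict String (List Int) × PySem.Dict String (List Int) × Option (Int × String)))
    (ln : String) :
    Option (PySem.Dict String (List Int) × PySem.Dict String (List Int) × Option (Int × String)) :=
  match st with
  | none => none
  | some (chain, chain_range, prev) =>
    let cs := ln.toList
    if !(PySem.List.slice cs none (some 4) == "ATOM".toList) &&
       !(PySem.List.slice cs none (some 6) == "HETATM".toList) then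
      some (chain, chain_range, prev)
    else if id == 0 && PySem.Chars.isIn "HOH".toList (PySem.List.slice cs (some 16) (some 20)) then
      some (chain, chain_range, prev)
    else
      let ch := String.ofList (PySem.Chars.strip (PySem.List.slice cs (some 20) (some 22)))
      match PySem.Int.ofChars? (PySem.List.slice cs (some 22) (some 26)) with
      | none => none
      | some n =>
        if some (n, ch) == prev then some (chain, chain_range, prev)
        else if chain.contains ch then
          match chain_range.get? ch with
          | some [lo, hi] =>
            some (chain.modify ch [] (· ++ [n]),
                  chain_range.insert ch [min lo n, max hi n], some (n, ch))
          | _ => none   -- 'lo, hi = chain_range[ch]': unpack failure (never reached)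
        else
          some (chain.insert ch [n], chain_range.insert ch [n, n], some (n, ch))

def chain_res_list_alt (fr : List String) (id : Int) :
    (List (String × List Int)) × (List (String × List Int)) :=
  match fr.foldl (pvStepB id) (some (PySem.Dict.empty, PySem.Dict.empty, none)) with
  | none => ([], [])
  | some (chain, chain_range, _) => (chain.items, chain_range.items)

-- ===== PRECONDITION & SPEC =====
def pvMatch (cs : List Char) : Bool :=
  PySem.Chars.isIn "ATOM".toList (PySem.List.slice cs none (some 4)) ||
  PySem.Chars.isIn "HETATM".toList (PySem.List.slice cs none (some 6))
def pvHOHSkip (id : Int) (cs : List Char) : Bool :=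
  id == 0 && PySem.Chars.isIn "HOH".toList (PySem.List.slice cs (some 16) (some 20))
def pvResOK (cs : List Char) : Bool :=
  (PySem.Int.ofChars? (PySem.List.slice cs (some 22) (some 26))).elim false (fun n => decide (-99999 < n))

-- Pre_ excludes only the inputs on which A raises ValueError: a kept ATOM/HETATM line whose
-- residue field ln[22:26] does not parse as an int.  (The bound -99999 < n holds automatically
-- for every value parsed from a 4-character field, so it excludes nothing further.)
def Pre_chain_res_list (fr : List String) (id : Int) : Prop :=
  ∀ ln ∈ fr, pvMatch ln.toList = true → pvHOHSkip id ln.toList = false → pvResOK ln.toList = true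
instance (fr : List String) (id : Int) : Decidable (Pre_chain_res_list fr id) := by
  unfold Pre_chain_res_list; infer_instance

def pvWitness_chain_res_list : List String × Int :=
  (["ATOM            SOL  A  12", "HETATM          HOH  B   7"], 1)

def Spec_chain_res_list (fr : List String) (id : Int)
    (out : (List (String × List Int)) × (List (String × List Int))) : Prop :=
  out = chain_res_list_alt fr id
instance (fr : List String) (id : Int)
    (out : (List (String × List Int)) × (List (String × List Int))) :
    Decidable (Spec_chain_res_list fr id out) := by unfold Spec_chain_res_list; infer_instance

-- ===== CLAIM (what is proved, stated in full; the proofs are below) =====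
def Claim_equal_chain_res_list : Prop :=
  ∀ (fr : List String) (id : Int), Dom_chain_res_list fr id →
    Pre_chain_res_list fr id → Spec_chain_res_list fr id (chain_res_list fr id)

-- ===== LEMMAS AND PROOFS =====

-- range entry recorded for a chain with residue list l
def pvRng (l : List Int) : List Int :=
  [(PySem.List.min? l (fun y => y)).getD 0, (PySem.List.max? l (fun y => y)).getD 0]

-- the coupling invariant between A's loop state and B's loop state
def pvInv (a : PySem.Dict String (List Int) × String × Int)
    (b : PySem.Dict String (List Int) × PySem.Dict String (List Int) × Option (Int × String)) : Prop :=
  a.1 = b.1 ∧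
  a.1.keys.Nodup ∧
  (∀ k ∈ a.1.keys, a.1.getD k [] ≠ []) ∧
  b.2.1.items = a.1.keys.map (fun x => (x, pvRng (a.1.getD x []))) ∧
  (match b.2.2 with
   | none => a.2.2 = -99999
   | some p => p = (a.2.2, a.2.1) ∧ a.2.1 ∈ a.1.keys)

lemma pvDropWhile_head_false {p : Char → Bool} {l t : List Char} {x : Char}
    (h : l.dropWhile p = x :: t) : p x = false := by
  induction l with
  | nil => simp at h
  | cons a as ih =>
    rw [List.dropWhile_cons] at h
    split at h
    · exact ih h
    · next hc => cases h; simpa using hc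

lemma pvStrip_ne_space (l : List Char) : String.ofList (PySem.Chars.strip l) ≠ " " := by
  intro he
  have h : PySem.Chars.strip l = [' '] := by
    have := congrArg String.toList he
    simpa using this
  unfold PySem.Chars.strip PySem.Chars.rstrip at h
  have h2 : List.dropWhile PySem.Chars.isspace (PySem.Chars.lstrip l).reverse = [' '] := by
    have := congrArg List.reverse h
    simpa using this
  have := pvDropWhile_head_false h2
  simp [PySem.Chars.isspace] at this

lemma pvInfix_short (sub s : List Char) (h : PySem.Chars.isIn sub s = true)
    (hl : s.length ≤ sub.length) : s = sub := by
  have hi := (PySem.Chars.isIn_iff_infix sub s).mp h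
  exact (List.Sublist.eq_of_length_le hi.sublist hl).symm

lemma pvSlice4_len (cs : List Char) : (PySem.List.slice cs none (some (4:Int))).length ≤ 4 := by
  simp [pysem]

lemma pvSlice6_len (cs : List Char) : (PySem.List.slice cs none (some (6:Int))).length ≤ 6 := by
  simp [pysem]

lemma pvMatch_iff (cs : List Char) : pvMatch cs = true ↔
    (PySem.List.slice cs none (some 4) = "ATOM".toList ∨
     PySem.List.slice cs none (some 6) = "HETATM".toList) := by
  unfold pvMatch
  constructor
  · intro h
    rcases Bool.or_eq_true_iff.mp h with h4 | h6
    · exact Or.inl (pvInfix_short _ _ h4 (by simpa using pvSlice4_len cs))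
    · exact Or.inr (pvInfix_short _ _ h6 (by simpa using pvSlice6_len cs))
  · intro h
    rcases h with h4 | h6
    · exact Bool.or_eq_true_iff.mpr (Or.inl ((PySem.Chars.isIn_iff_infix _ _).mpr (h4 ▸ List.infix_refl _)))
    · exact Bool.or_eq_true_iff.mpr (Or.inr ((PySem.Chars.isIn_iff_infix _ _).mpr (h6 ▸ List.infix_refl _)))

lemma pvMin?_append (l : List Int) (m n : Int)
    (h : PySem.List.min? l (fun y => y) = some m) :
    PySem.List.min? (l ++ [n]) (fun y => y) = some (min m n) := by
  cases l with
  | nil => simp [PySem.List.min?] at h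
  | cons x t =>
    rw [PySem.List.min?_id_cons] at h
    rw [show x :: t ++ [n] = x :: (t ++ [n]) from rfl, PySem.List.min?_id_cons,
      List.foldl_append]
    simp at h
    simp [h]

lemma pvMax?_append (l : List Int) (m n : Int)
    (h : PySem.List.max? l (fun y => y) = some m) :
    PySem.List.max? (l ++ [n]) (fun y => y) = some (max m n) := by
  cases l with
  | nil => simp [PySem.List.max?] at h
  | cons x t =>
    rw [PySem.List.max?_id_cons] at h
    rw [show x :: t ++ [n] = x :: (t ++ [n]) from rfl, PySem.List.max?_id_cons,
      List.foldl_append]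
    simp at h
    simp [h]

lemma pvRng_append (l : List Int) (mn mx n : Int)
    (hmn : PySem.List.min? l (fun y => y) = some mn)
    (hmx : PySem.List.max? l (fun y => y) = some mx) :
    pvRng (l ++ [n]) = [min mn n, max mx n] := by
  unfold pvRng
  rw [pvMin?_append l mn n hmn, pvMax?_append l mx n hmx]
  rfl

lemma pvRng_single (n : Int) : pvRng [n] = [n, n] := by
  simp [pvRng, PySem.List.min?, PySem.List.max?]

-- A's second loop, characterised on a dict with Nodup keys and nonempty values
lemma pvRange_items (chain : PySem.Dict String (List Int))
    (hnd : chain.keys.Nodup) (hne : ∀ k ∈ chain.keys, chain.getD k [] ≠ []) :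
    (chain.keys.foldl (pvRangeStep chain) PySem.Dict.empty).items
      = chain.keys.map (fun x => (x, pvRng (chain.getD x []))) := by
  rw [PySem.List.foldl_congr_mem chain.keys (pvRangeStep chain)
      (fun r x => r.insert x (pvRng (chain.getD x []))) PySem.Dict.empty ?_]
  · have := PySem.Dict.items_foldl_insert_fresh chain.keys (fun x => x)
      (fun x => pvRng (chain.getD x [])) PySem.Dict.empty
      (fun a _ => by simp [PySem.Dict.contains_empty]) (by simpa using hnd)
    simpa [PySem.Dict.empty] using this
  · intro acc x hx
    have hl := hne x hx
    obtain ⟨mn, hmn⟩ : ∃ mn, PySem.List.min? (chain.getD x []) (fun y => y) = some mn := by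
      cases hm : PySem.List.min? (chain.getD x []) (fun y => y) with
      | none => exact absurd ((PySem.List.min?_eq_none_iff _ _).mp hm) hl
      | some v => exact ⟨v, rfl⟩
    obtain ⟨mx, hmx⟩ : ∃ mx, PySem.List.max? (chain.getD x []) (fun y => y) = some mx := by
      cases hm : PySem.List.max? (chain.getD x []) (fun y => y) with
      | none => exact absurd ((PySem.List.max?_eq_none_iff _ _).mp hm) hl
      | some v => exact ⟨v, rfl⟩
    unfold pvRangeStep
    rw [if_pos (by simpa [List.length_pos_iff] using hl), hmn, hmx]
    simp [pvRng, hmn, hmx]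


lemma pvStep_inv (id : Int) (ln : String)
    (a : PySem.Dict String (List Int) × String × Int)
    (b : PySem.Dict String (List Int) × PySem.Dict String (List Int) × Option (Int × String))
    (h : pvInv a b)
    (hpre : pvMatch ln.toList = true → pvHOHSkip id ln.toList = false → pvResOK ln.toList = true) :
    ∃ a' b', pvStepA id (some a) ln = some a' ∧ pvStepB id (some b) ln = some b' ∧ pvInv a' b' := by
  obtain ⟨chain, cho, no⟩ := a
  obtain ⟨chainB, rangeB, prev⟩ := b
  obtain ⟨h1, h2, h3, h4, h5⟩ := h
  simp only at h1 h2 h3 h4 h5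
  subst h1
  cases hm : pvMatch ln.toList with
  | false =>
    -- line is neither ATOM nor HETATM: both sides keep their state
    have hm' := hm
    unfold pvMatch at hm'
    simp only [Bool.or_eq_false_iff] at hm'
    have e4 : ¬ PySem.List.slice ln.toList none (some 4) = "ATOM".toList := by
      intro e
      have he : PySem.Chars.isIn "ATOM".toList (PySem.List.slice ln.toList none (some 4)) = true :=
        (PySem.Chars.isIn_iff_infix _ _).mpr (by rw [e])
      rw [he] at hm'; simp at hm'
    have e6 : ¬ PySem.List.slice ln.toList none (some 6) = "HETATM".toList := by
      intro e
      have he : PySem.Chars.isIn "HETATM".toList (PySem.List.slice ln.toList none (some 6)) = true :=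
        (PySem.Chars.isIn_iff_infix _ _).mpr (by rw [e])
      rw [he] at hm'; simp at hm'
    refine ⟨(chain, cho, no), (chain, rangeB, prev), ?_, ?_, ⟨rfl, h2, h3, h4, h5⟩⟩
    · simp only [pvStepA]
      rw [show (PySem.Chars.isIn "ATOM".toList (PySem.List.slice ln.toList none (some 4)) ||
        PySem.Chars.isIn "HETATM".toList (PySem.List.slice ln.toList none (some 6))) = false from by
          simpa [pvMatch] using hm]
      simp
    · simp only [pvStepB]
      rw [show (!(PySem.List.slice ln.toList none (some 4) == "ATOM".toList) &&
        !(PySem.List.slice ln.toList none (some 6) == "HETATM".toList)) = true from by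
          simp only [Bool.and_eq_true, Bool.not_eq_true', beq_eq_false_iff_ne, ne_eq]
          exact ⟨e4, e6⟩]
      simp
  | true =>
    have hmatch := (pvMatch_iff ln.toList).mp hm
    have hA4 : (PySem.Chars.isIn "ATOM".toList (PySem.List.slice ln.toList none (some 4)) ||
        PySem.Chars.isIn "HETATM".toList (PySem.List.slice ln.toList none (some 6))) = true := by
      simpa [pvMatch] using hm
    have hB4 : (!(PySem.List.slice ln.toList none (some 4) == "ATOM".toList) &&
        !(PySem.List.slice ln.toList none (some 6) == "HETATM".toList)) = false := by
      rcases hmatch with e | e <;> simp [e]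
    cases hh : pvHOHSkip id ln.toList with
    | true =>
      -- water line skipped by both
      have hh' : (id == 0 && PySem.Chars.isIn "HOH".toList
          (PySem.List.slice ln.toList (some 16) (some 20))) = true := by simpa [pvHOHSkip] using hh
      refine ⟨(chain, cho, no), (chain, rangeB, prev), ?_, ?_, ⟨rfl, h2, h3, h4, h5⟩⟩
      · simp only [pvStepA]; rw [hA4, hh']; simp
      · simp only [pvStepB]; rw [hB4, hh']; simp
    | false =>
      have hh' : (id == 0 && PySem.Chars.isIn "HOH".toList
          (PySem.List.slice ln.toList (some 16) (some 20))) = false := by simpa [pvHOHSkip] using hh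
      have hres := hpre hm hh
      unfold pvResOK at hres
      cases hof : PySem.Int.ofChars? (PySem.List.slice ln.toList (some 22) (some 26)) with
      | none => rw [hof] at hres; simp at hres
      | some n =>
      rw [hof] at hres
      have hbound : -99999 < n := by simpa using hres
      simp only [pvStepA, pvStepB]
      rw [hA4, hB4, hh', hof]
      simp only [reduceIte]
      generalize hchdef : String.ofList (PySem.Chars.strip (PySem.List.slice ln.toList (some 20) (some 22))) = ch
      have hchs : (ch == " ") = false := by
        rw [← hchdef]
        simpa using pvStrip_ne_space (PySem.List.slice ln.toList (some 20) (some 22))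
      have hkeysR : rangeB.keys = chain.keys := by
        simp [PySem.Dict.keys, h4, List.map_map]
      simp only [hchs, Bool.not_false, Bool.and_true]
      cases hc : chain.contains ch with
      | true =>
        simp only [hc, Bool.not_true, Bool.false_eq_true, reduceIte]
        -- the chain already has ch: both sides append and update the running range
        have hmemk : ch ∈ chain.keys := (PySem.Dict.contains_iff_mem_keys _ _).mp hc
        have hl : chain.getD ch [] ≠ [] := h3 ch hmemk
        obtain ⟨mn, hmn⟩ : ∃ mn, PySem.List.min? (chain.getD ch []) (fun y => y) = some mn := by
          cases hq : PySem.List.min? (chain.getD ch []) (fun y => y) with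
          | none => exact absurd ((PySem.List.min?_eq_none_iff _ _).mp hq) hl
          | some v => exact ⟨v, rfl⟩
        obtain ⟨mx, hmx⟩ : ∃ mx, PySem.List.max? (chain.getD ch []) (fun y => y) = some mx := by
          cases hq : PySem.List.max? (chain.getD ch []) (fun y => y) with
          | none => exact absurd ((PySem.List.max?_eq_none_iff _ _).mp hq) hl
          | some v => exact ⟨v, rfl⟩
        have hrng : pvRng (chain.getD ch []) = [mn, mx] := by simp [pvRng, hmn, hmx]
        have hndR : rangeB.keys.Nodup := by rw [hkeysR]; exact h2
        have hget : rangeB.get? ch = some [mn, mx] := by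
          rw [← hrng]
          exact (PySem.Dict.get?_eq_some_iff_mem_items _ _ _ hndR).mpr
            (by rw [h4]; exact List.mem_map_of_mem hmemk)
        have hkeys' : (chain.modify ch [] (fun x => x ++ [n])).keys = chain.keys := by
          rw [PySem.Dict.keys_modify, PySem.Dict.keys_insert_of_contains _ _ hc]
        have hinv' : pvInv (chain.modify ch [] (fun x => x ++ [n]), ch, n)
            (chain.modify ch [] (fun x => x ++ [n]),
             rangeB.insert ch [min mn n, max mx n], some (n, ch)) := by
          refine ⟨rfl, ?_, ?_, ?_, ⟨rfl, ?_⟩⟩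
          · rw [hkeys']; exact h2
          · intro k hk
            rw [hkeys'] at hk
            rw [PySem.Dict.getD_modify]
            by_cases hkc : k = ch
            · simp [hkc]
            · simp only [hkc, reduceIte]
              exact h3 k hk
          · rw [PySem.Dict.items_insert_of_contains _ _
              (by rw [PySem.Dict.contains_iff_mem_keys, hkeysR]; exact hmemk)]
            rw [h4, List.map_map, hkeys']
            apply List.map_congr_left
            intro x hxk
            by_cases hxc : x = ch
            · subst hxc
              simp [pvRng_append _ _ _ n hmn hmx]
            · simp [Function.comp, hxc, PySem.Dict.getD_modify]
          · rw [hkeys']; exact hmemk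
        cases prev with
        | none =>
          simp only at h5
          have hne : (n == no) = false := by subst h5; simp; omega
          refine ⟨_, _, ?_, ?_, hinv'⟩
          · simp [hne]
          · simp [hget]
        | some p =>
          simp only at h5
          obtain ⟨hp, hcho⟩ := h5
          subst hp
          by_cases hd : n = no ∧ ch = cho
          · refine ⟨(chain, cho, no), (chain, rangeB, some (no, cho)), ?_, ?_,
              ⟨rfl, h2, h3, h4, ⟨rfl, hcho⟩⟩⟩
            · simp [hd.1, hd.2]
            · simp [hd.1, hd.2]
          · have hdupf : (n == no && ch == cho) = false := by
              rcases not_and_or.mp hd with hx | hx <;> simp [hx]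
            have hskipf : (some (n, ch) == some (no, cho)) = false := by
              simp only [beq_eq_false_iff_ne, ne_eq, Option.some.injEq, Prod.mk.injEq]
              exact fun hx => hd ⟨hx.1, hx.2⟩
            refine ⟨_, _, ?_, ?_, hinv'⟩
            · simp [hdupf]
            · simp [hskipf, hget]
      | false =>
        simp only [Bool.not_false, reduceIte]
        -- ch is a fresh chain: A inserts [] then appends; B inserts [n] and range [n, n]
        have hnmem : ch ∉ chain.keys := fun hmem =>
          by rw [(PySem.Dict.contains_iff_mem_keys _ _).mpr hmem] at hc; cases hc
        have heq : (chain.insert ch []).modify ch [] (fun x => x ++ [n]) = chain.insert ch [n] := by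
          simp [PySem.Dict.modify, PySem.Dict.getD_insert_self, PySem.Dict.insert_insert_self]
        have hcR : rangeB.contains ch = false := by
          cases hcc : rangeB.contains ch with
          | false => rfl
          | true =>
            rw [PySem.Dict.contains_iff_mem_keys, hkeysR] at hcc
            exact absurd hcc hnmem
        have hkeys' : (chain.insert ch [n]).keys = chain.keys ++ [ch] :=
          PySem.Dict.keys_insert_of_not_contains _ _ hc
        have hinv' : pvInv (chain.insert ch [n], ch, n)
            (chain.insert ch [n], rangeB.insert ch [n, n], some (n, ch)) := by
          refine ⟨rfl, PySem.Dict.nodup_keys_insert _ _ _ h2, ?_, ?_, ⟨rfl, ?_⟩⟩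
          · intro k hk
            rw [hkeys'] at hk
            rcases List.mem_append.mp hk with hk | hk
            · have hkc : k ≠ ch := fun e => hnmem (e ▸ hk)
              rw [PySem.Dict.getD_insert]
              simp only [hkc, reduceIte]
              exact h3 k hk
            · simp only [List.mem_singleton] at hk
              subst hk
              rw [PySem.Dict.getD_insert_self]
              simp
          · rw [PySem.Dict.items_insert_of_not_contains _ _ hcR, h4, hkeys', List.map_append]
            congr 1
            · apply List.map_congr_left
              intro x hxk
              have hxc : x ≠ ch := fun e => hnmem (e ▸ hxk)
              rw [PySem.Dict.getD_insert]
              simp [hxc]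
            · simp [PySem.Dict.getD_insert_self, pvRng_single]
          · rw [hkeys']; simp
        have hdupf : (n == no && ch == cho) = false := by
          cases prev with
          | none =>
            simp only at h5
            have : (n == no) = false := by subst h5; simp; omega
            simp [this]
          | some p =>
            simp only at h5
            have : (ch == cho) = false := by
              simp only [beq_eq_false_iff_ne, ne_eq]
              exact fun e => hnmem (e ▸ h5.2)
            simp [this]
        have hskipf : (some (n, ch) == prev) = false := by
          cases prev with
          | none => rfl
          | some p =>
            simp only at h5
            obtain ⟨hp, hcho⟩ := h5
            subst hp
            have : ch ≠ cho := fun e => hnmem (e ▸ hcho)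
            simp [Prod.ext_iff, this]
        refine ⟨_, _, ?_, ?_, hinv'⟩
        · simp [PySem.Dict.contains_insert_self, hdupf, heq]
        · simp [hskipf]


lemma pvFold_inv (id : Int) (fr : List String)
    (hpre : ∀ ln ∈ fr, pvMatch ln.toList = true → pvHOHSkip id ln.toList = false → pvResOK ln.toList = true)
    (a : PySem.Dict String (List Int) × String × Int)
    (b : PySem.Dict String (List Int) × PySem.Dict String (List Int) × Option (Int × String))
    (h : pvInv a b) :
    ∃ a' b', fr.foldl (pvStepA id) (some a) = some a' ∧
      fr.foldl (pvStepB id) (some b) = some b' ∧ pvInv a' b' := by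
  induction fr generalizing a b with
  | nil => exact ⟨a, b, rfl, rfl, h⟩
  | cons ln rest ih =>
    obtain ⟨a1, b1, hA1, hB1, h1⟩ :=
      pvStep_inv id ln a b h (hpre ln (List.mem_cons_self))
    obtain ⟨a', b', hA, hB, h'⟩ := ih (fun x hx => hpre x (List.mem_cons_of_mem _ hx)) a1 b1 h1
    exact ⟨a', b', by simpa [hA1] using hA, by simpa [hB1] using hB, h'⟩

lemma pvInv_init : pvInv (PySem.Dict.empty, "?", (-99999 : Int)) (PySem.Dict.empty, PySem.Dict.empty, none) := by
  refine ⟨rfl, ?_, ?_, ?_, rfl⟩ <;> simp [PySem.Dict.empty]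

-- ===== VERDICT (by name: the statement is the Claim_ definition above) =====
theorem chain_res_list_spec : Claim_equal_chain_res_list := by
  intro fr id _ hpre
  unfold Spec_chain_res_list chain_res_list chain_res_list_alt
  obtain ⟨⟨chainA, cho, no⟩, ⟨chainB, rangeB, prev⟩, hA, hB, hinv⟩ :=
    pvFold_inv id fr hpre _ _ pvInv_init
  rw [hA, hB]
  obtain ⟨h1, h2, h3, h4, _⟩ := hinv
  simp only at h1 h2 h3 h4
  subst h1
  simp only
  rw [pvRange_items chainA h2 h3, ← h4]
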